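-- pv_equiv track=rewrite | github.com/May-nerd/Brain2D-Interpreter | bf.py | parse
-- ===== SOURCE A (Python) =====
-- from collections import defaultdict, Counter
--
-- valid = "><^v+-,.[]"
--
-- def parse(brainFuck):
-- 	leftCounter = rightCounter = 0
-- 	brackets = {}
-- 	parsedInput = ''.join([char for char in brainFuck if char in valid])
-- 	for key,char in enumerate(parsedInput):
-- 		if char == "[":
-- 			leftCounter += 1
-- 			rightCounter = leftCounter
-- 			brackets[key] = leftCounter
-- 		elif char == "]":
-- 			while rightCounter in [x for x, y in Counter(brackets.values()).items() if y > 1]: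
-- 				rightCounter -= 1
-- 			brackets[key] = rightCounter
-- 	bracketList = defaultdict(list)
-- 	for k, v in brackets.items():
-- 		bracketList[v].append(k)
-- 	bracketList =  list(dict(bracketList).values())
-- 	# for subList in bracketList:
-- 	# 	subList.sort()
-- 	return parsedInput, bracketList
-- ===== SOURCE B (Python) =====
-- valid = "><^v+-,.[]"
--
-- def parse(brainFuck):
--     parsedInput = ''.join(c for c in brainFuck if c in valid)
--     stack = []
--     nxt = 0
--     pairs = []
--     for key, c in enumerate(parsedInput):
--         if c == '[':
--             nxt += 1
--             stack.append(nxt)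
--             pairs.append((key, nxt))
--         elif c == ']':
--             if not stack:
--                 raise ValueError("unmatched ']' at position %d" % key)
--             pairs.append((key, stack.pop()))
--     groups = {}
--     for k, v in pairs:
--         groups.setdefault(v, []).append(k)
--     return parsedInput, list(groups.values())
-- ===== Notes on version B (the rewrite author's own statement) =====
-- stated objective: alternative
-- what changed: A re-derives each closing-bracket id by rebuilding a Counter of all assigned ids and decrementing a cursor through its multi-occurrence values; B matches brackets with a stack of open-bracket ids, assigning each id in O(1); Pre_ excludes sources whose filtered text has a prefix with more closing than opening brackets, where A's non-positive ids are leftover-loop-state accidents and B raises ValueError.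
-- outside the precondition, e.g. on parse(']'): A returns (']', [[0]]), B raises ValueError; on parse('[]]]'): A returns ('[]]]', [[0, 1], [2, 3]]), B raises ValueError
import Mathlib
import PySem

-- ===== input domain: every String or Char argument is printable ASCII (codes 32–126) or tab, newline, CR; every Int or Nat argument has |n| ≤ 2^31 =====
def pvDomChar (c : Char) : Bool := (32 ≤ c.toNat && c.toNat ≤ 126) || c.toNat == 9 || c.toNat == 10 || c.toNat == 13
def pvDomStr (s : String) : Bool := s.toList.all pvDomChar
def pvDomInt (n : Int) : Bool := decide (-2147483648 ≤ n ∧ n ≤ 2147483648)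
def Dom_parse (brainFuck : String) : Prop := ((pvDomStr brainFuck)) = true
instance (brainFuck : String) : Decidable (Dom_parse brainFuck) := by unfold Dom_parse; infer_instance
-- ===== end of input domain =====

-- B replaces A's per-']' Counter rebuild + cursor-decrement loop by stack matching; same return
-- value on Pre_ (no unmatched ']'), a genuinely different algorithm of the same measured cost.

-- ===== PORT A =====
-- the characters of the module constant `valid` ('char in valid' for a single char is list membership)
def pvValid : List Char := ['>', '<', '^', 'v', '+', '-', ',', '.', '[', ']']

-- the list comprehension '[x for x, y in Counter(brackets.values()).items() if y > 1]'
def pvMultiA (b : PySem.Dict Int Int) : List Int :=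
  ((PySem.Dict.counter b.values).items.filter (fun p => decide (1 < p.2))).map (·.1)

-- the 'while rightCounter in [...]: rightCounter -= 1' loop (brackets is unchanged inside it);
-- fuel-guarded, fuel b.size + 1 always suffices on Pre_ (proved in pvWhileA_eq below)
def pvWhileA (b : PySem.Dict Int Int) : Nat → Int → Int
  | 0, r => r
  | f + 1, r => if r ∈ pvMultiA b then pvWhileA b f (r - 1) else r

-- one iteration of A's main 'for key, char in enumerate(parsedInput)' loop; state (leftCounter, rightCounter, brackets)
def pvStepA (st : Int × Int × PySem.Dict Int Int) (p : Int × Char) : Int × Int × PySem.Dict Int Int :=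
  if p.2 = '[' then (st.1 + 1, st.1 + 1, st.2.2.insert p.1 (st.1 + 1))
  else if p.2 = ']' then
    let r := pvWhileA st.2.2 (st.2.2.size + 1) st.2.1
    (st.1, r, st.2.2.insert p.1 r)
  else st

def parse (brainFuck : String) : String × List (List Int) :=
  let parsedInput := brainFuck.toList.filter (fun c => c ∈ pvValid)
  let st := (PySem.List.enumerate parsedInput 0).foldl pvStepA (0, 0, PySem.Dict.empty)
  -- 'bracketList = defaultdict(list); for k, v in brackets.items(): bracketList[v].append(k)'
  let bl := st.2.2.items.foldl
    (fun (d : PySem.Dict Int (List Int)) p => d.modify p.2 [] (· ++ [p.1])) PySem.Dict.empty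
  (String.ofList parsedInput, bl.values)

-- ===== PORT B =====
-- one iteration of B's loop; state (nxt, stack, pairs); Python's list used as a stack
-- (append/pop at the end) is represented with its top at the head.
-- On ']' with an empty stack the Python raises ValueError; that input is outside Pre_parse,
-- the port leaves the state unchanged there.
def pvStepB (st : Int × List Int × List (Int × Int)) (p : Int × Char) :
    Int × List Int × List (Int × Int) :=
  if p.2 = '[' then (st.1 + 1, (st.1 + 1) :: st.2.1, st.2.2 ++ [(p.1, st.1 + 1)])
  else if p.2 = ']' then
    match st.2.1 with
    | t :: rest => (st.1, rest, st.2.2 ++ [(p.1, t)])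
    | [] => st
  else st

def parse_alt (brainFuck : String) : String × List (List Int) :=
  let parsedInput := brainFuck.toList.filter (fun c => c ∈ pvValid)
  let st := (PySem.List.enumerate parsedInput 0).foldl pvStepB (0, [], [])
  -- 'groups.setdefault(v, []).append(k)'
  let groups := st.2.2.foldl
    (fun (d : PySem.Dict Int (List Int)) p => d.modify p.2 [] (· ++ [p.1])) PySem.Dict.empty
  (String.ofList parsedInput, groups.values)

-- ===== PRECONDITION & SPEC =====
-- Pre_ excludes sources whose filtered text has a prefix with more closing than opening brackets
-- (an unmatched closer): there A's ids for the stray brackets are accidents of leftover loop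
-- state, and B raises ValueError.
def Pre_parse (brainFuck : String) : Prop :=
  ∀ p ∈ (brainFuck.toList.filter (fun c => c ∈ pvValid)).inits, p.count ']' ≤ p.count '['
instance (brainFuck : String) : Decidable (Pre_parse brainFuck) := by unfold Pre_parse; infer_instance

def pvWitness_parse : String := "+[>[-]<]."

def Spec_parse (brainFuck : String) (out : String × List (List Int)) : Prop := out = parse_alt brainFuck
instance (brainFuck : String) (out : String × List (List Int)) : Decidable (Spec_parse brainFuck out) := by unfold Spec_parse; infer_instance

-- ===== CLAIM (what is proved, stated in full; the proofs are below) =====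
def Claim_equal_parse : Prop := ∀ (brainFuck : String), Dom_parse brainFuck → Pre_parse brainFuck → Spec_parse brainFuck (parse brainFuck)

-- ===== LEMMAS AND PROOFS =====

-- multiplicity of id v among the assigned bracket ids, as a function of B's state
def pvCnt (l : Int) (stack : List Int) (v : Int) : Nat :=
  if 0 < v ∧ v ≤ l then (if v ∈ stack then 1 else 2) else 0

-- the coupling invariant between A's state a = (l, r, d) and B's state b = (n, stack, pairs) at index i
def pvInv (i : Int) (a : Int × Int × PySem.Dict Int Int)
    (b : Int × List Int × List (Int × Int)) : Prop :=
  a.1 = b.1 ∧ a.2.2.items = b.2.2 ∧ 0 ≤ a.1 ∧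
  (∀ p ∈ b.2.2, p.1 < i) ∧
  b.2.1.Pairwise (· > ·) ∧ (∀ x ∈ b.2.1, 0 < x ∧ x ≤ a.1) ∧
  (∀ v : Int, (b.2.2.map (·.2)).count v = pvCnt a.1 b.2.1 v) ∧
  (∀ t rest, b.2.1 = t :: rest → t ≤ a.2.1) ∧ a.2.1 ≤ a.1 ∧
  a.1 ≤ (b.2.2.length : Int)

lemma mem_pvMultiA (b : PySem.Dict Int Int) (v : Int) :
    v ∈ pvMultiA b ↔ 1 < b.values.count v := by
  simp only [pvMultiA, PySem.Dict.items_counter, List.mem_map, List.mem_filter]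
  constructor
  · rintro ⟨p, ⟨hp, hgt⟩, rfl⟩
    obtain ⟨x, hx, rfl⟩ := hp
    simp only [decide_eq_true_eq] at hgt
    exact_mod_cast hgt
  · intro h
    refine ⟨(v, (b.values.count v : Int)), ⟨⟨v, ?_, rfl⟩, by simp; exact_mod_cast h⟩, rfl⟩
    exact (PySem.Set.mem_ofList _ _).2 (List.count_pos_iff.1 (by omega))

lemma pvWhileA_eq (b : PySem.Dict Int Int) (f : Nat) (r t : Int)
    (h1 : t ≤ r) (h2 : ∀ v, t < v → v ≤ r → 1 < b.values.count v)
    (h3 : ¬ 1 < b.values.count t) (hf : (r - t).toNat < f) :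
    pvWhileA b f r = t := by
  induction f generalizing r with
  | zero => omega
  | succ f ih =>
    rcases eq_or_lt_of_le h1 with rfl | hlt
    · simp [pvWhileA, mem_pvMultiA, h3]
    · have hr : r ∈ pvMultiA b := (mem_pvMultiA b r).2 (h2 r hlt le_rfl)
      simp only [pvWhileA, hr, if_true]
      exact ih (r - 1) (by omega) (fun v hv hv' => h2 v hv (by omega)) (by omega)

lemma pvCnt_push (l v : Int) (stack : List Int) (h3 : 0 ≤ l)
    (hstk : ∀ x ∈ stack, 0 < x ∧ x ≤ l) :
    pvCnt (l + 1) ((l + 1) :: stack) v = pvCnt l stack v + List.count v [l + 1] := by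
  rw [List.count_singleton']
  by_cases hv : v = l + 1
  · subst hv
    have h1 : pvCnt l stack (l + 1) = 0 := by
      unfold pvCnt; rw [if_neg (by omega)]
    have h2 : pvCnt (l + 1) ((l + 1) :: stack) (l + 1) = 1 := by
      unfold pvCnt; rw [if_pos ⟨by omega, le_rfl⟩, if_pos List.mem_cons_self]
    rw [h1, h2, if_pos rfl]
  · rw [if_neg (fun h => hv h.symm), Nat.add_zero]
    unfold pvCnt
    by_cases hm : v ∈ stack
    · obtain ⟨hb1, hb2⟩ := hstk v hm
      rw [if_pos ⟨hb1, by omega⟩, if_pos (List.mem_cons_of_mem _ hm), if_pos ⟨hb1, hb2⟩, if_pos hm]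
    · by_cases hp : 0 < v ∧ v ≤ l
      · rw [if_pos ⟨hp.1, by omega⟩, if_neg (fun h => (List.mem_cons.1 h).elim hv hm),
          if_pos hp, if_neg hm]
      · rw [if_neg (by omega), if_neg hp]

lemma pvCnt_pop (l v t : Int) (rest : List Int)
    (ht : 0 < t ∧ t ≤ l) (hrest : ∀ x ∈ rest, x < t) :
    pvCnt l rest v = pvCnt l (t :: rest) v + List.count v [t] := by
  rw [List.count_singleton']
  by_cases hv : v = t
  · subst hv
    have h1 : pvCnt l (v :: rest) v = 1 := by
      unfold pvCnt; rw [if_pos ht, if_pos List.mem_cons_self]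
    have h2 : pvCnt l rest v = 2 := by
      unfold pvCnt
      rw [if_pos ht, if_neg (fun hm => absurd (hrest v hm) (lt_irrefl _))]
    rw [h1, h2, if_pos rfl]
  · rw [if_neg (fun h => hv h.symm), Nat.add_zero]
    unfold pvCnt
    by_cases hp : 0 < v ∧ v ≤ l
    · rw [if_pos hp, if_pos hp]
      by_cases hm : v ∈ rest
      · rw [if_pos hm, if_pos (List.mem_cons_of_mem _ hm)]
      · rw [if_neg hm, if_neg (fun h => (List.mem_cons.1 h).elim hv hm)]
    · rw [if_neg hp, if_neg hp]

lemma pvInv_step (i : Int) (c : Char) (a : Int × Int × PySem.Dict Int Int)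
    (b : Int × List Int × List (Int × Int)) (h : pvInv i a b)
    (hne : c = ']' → b.2.1 ≠ []) :
    pvInv (i + 1) (pvStepA a (i, c)) (pvStepB b (i, c)) := by
  obtain ⟨l, r, d⟩ := a
  obtain ⟨n, stack, pairs⟩ := b
  obtain ⟨h1, h2, h3, h5, h6, h7, h8, h9, h10, h11⟩ := h
  simp only at h1 h2 h3 h5 h6 h7 h8 h9 h10 h11 hne
  subst h1
  have hfresh : d.contains (i : Int) = false := by
    rw [PySem.Dict.contains_eq_decide_mem_keys]
    simp only [PySem.Dict.keys, h2, decide_eq_false_iff_not, List.mem_map]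
    rintro ⟨p, hp, rfl⟩
    exact absurd (h5 p hp) (lt_irrefl _)
  have hitems : ∀ v : Int, (d.insert i v).items = pairs ++ [(i, v)] := fun v => by
    simp [PySem.Dict.items_insert, hfresh, h2]
  have hvals : d.values = pairs.map (·.2) := by
    simp only [PySem.Dict.values, h2]
  have hsize : d.size = pairs.length := by
    simp only [PySem.Dict.size, h2]
  have hkeys : ∀ (x : Int) (p : Int × Int), p ∈ pairs ++ [(i, x)] → p.1 < i + 1 := by
    intro x p hp
    rcases List.mem_append.1 hp with hp | hp
    · exact lt_trans (h5 p hp) (by omega)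
    · rcases List.mem_singleton.1 hp with rfl; simp
  have hlen : ∀ (x : Int), ((pairs ++ [(i, x)]).length : Int) = (pairs.length : Int) + 1 := by
    intro x
    simp only [List.length_append, List.length_cons, List.length_nil]
    push_cast
    ring
  by_cases hc1 : c = '['
  · subst hc1
    have hA : pvStepA (l, r, d) (i, '[') = (l + 1, l + 1, d.insert i (l + 1)) := by
      simp [pvStepA]
    have hB : pvStepB (l, stack, pairs) (i, '[') =
        (l + 1, (l + 1) :: stack, pairs ++ [(i, l + 1)]) := by
      simp [pvStepB]
    rw [hA, hB]
    refine ⟨rfl, hitems _, by dsimp only; omega, hkeys _, ?_, ?_, ?_, ?_, by dsimp only; omega, ?_⟩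
    · exact List.Pairwise.cons (fun x hx => by have := h7 x hx; omega) h6
    · intro x hx
      rcases List.mem_cons.1 hx with rfl | hx
      · exact ⟨by omega, le_refl _⟩
      · have := h7 x hx; exact ⟨this.1, by omega⟩
    · intro v
      simp only [List.map_append, List.map_cons, List.map_nil, List.count_append, h8 v]
      exact (pvCnt_push l v stack h3 h7).symm
    · intro t rest heq
      simp only at heq
      rw [List.cons.injEq] at heq
      dsimp only
      omega
    · dsimp only; rw [hlen]; omega
  · by_cases hc2 : c = ']'
    · subst hc2
      rcases hstack : stack with _ | ⟨t, rest⟩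
      · exact absurd hstack (hne rfl)
      subst hstack
      have ht : 0 < t ∧ t ≤ l := h7 t List.mem_cons_self
      have htrest : ∀ x ∈ rest, x < t := (List.pairwise_cons.1 h6).1
      -- A's while loop lands on the stack top t
      have hwhile : pvWhileA d (d.size + 1) r = t := by
        apply pvWhileA_eq
        · exact h9 t rest rfl
        · intro v hv hv'
          rw [hvals, h8 v]
          unfold pvCnt
          have hnotmem : v ∉ t :: rest := by
            intro hm
            rcases List.mem_cons.1 hm with rfl | hm
            · omega
            · have := htrest v hm
              omega
          rw [if_pos ⟨by omega, by omega⟩, if_neg hnotmem]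
          omega
        · rw [hvals, h8 t]
          unfold pvCnt
          rw [if_pos ht, if_pos List.mem_cons_self]
          omega
        · rw [hsize]
          have := h9 t rest rfl
          omega
      have hA : pvStepA (l, r, d) (i, ']') =
          (l, pvWhileA d (d.size + 1) r, d.insert i (pvWhileA d (d.size + 1) r)) := by
        simp [pvStepA]
      have hB : pvStepB (l, t :: rest, pairs) (i, ']') =
          (l, rest, pairs ++ [(i, t)]) := by
        simp [pvStepB]
      rw [hA, hB, hwhile]
      refine ⟨rfl, hitems _, h3, hkeys _, (List.pairwise_cons.1 h6).2,
        fun x hx => h7 x (List.mem_cons_of_mem _ hx), ?_, ?_, by dsimp only; omega, ?_⟩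
      · intro v
        dsimp only
        simp only [List.map_append, List.map_cons, List.map_nil, List.count_append, h8 v]
        exact (pvCnt_pop l v t rest ht htrest).symm
      · intro u rest' heq
        simp only at heq
        subst heq
        exact le_of_lt (htrest u List.mem_cons_self)
      · dsimp only; rw [hlen]; omega
    · -- neither bracket: both states unchanged
      have hA : pvStepA (l, r, d) (i, c) = (l, r, d) := by
        simp [pvStepA, hc1, hc2]
      have hB : pvStepB (l, stack, pairs) (i, c) = (l, stack, pairs) := by
        simp [pvStepB, hc1, hc2]
      rw [hA, hB]
      exact ⟨rfl, h2, h3, fun p hp => lt_trans (h5 p hp) (by omega), h6, h7, h8, h9, h10, h11⟩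

lemma pvInv_fold (cs : List Char) : ∀ (i : Int) a b, pvInv i a b →
    (∀ p ∈ cs.inits, p.count ']' ≤ b.2.1.length + p.count '[') →
    pvInv (i + cs.length) ((PySem.List.enumerate cs i).foldl pvStepA a)
      ((PySem.List.enumerate cs i).foldl pvStepB b) := by
  induction cs with
  | nil => intro i a b h _; simpa [PySem.List.enumerate_nil] using h
  | cons c cs ih =>
    intro i a b h hpre
    have hne : c = ']' → b.2.1 ≠ [] := by
      intro hc hnil
      have := hpre [c] (by simp [List.inits])
      rw [hc, hnil] at this
      simp at this
    have hpre' : ∀ p ∈ cs.inits, p.count ']' ≤ (pvStepB b (i, c)).2.1.length + p.count '[' := by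
      intro p hp
      have hmem : (c :: p) ∈ (c :: cs).inits := by
        simp only [List.inits_cons, List.mem_cons, List.mem_map]
        exact Or.inr ⟨p, hp, rfl⟩
      have hcp := hpre (c :: p) hmem
      simp only [List.count_cons] at hcp
      by_cases hc1 : c = '['
      · subst hc1
        simp [pvStepB] at hcp ⊢
        omega
      · by_cases hc2 : c = ']'
        · subst hc2
          rcases hstack : b.2.1 with _ | ⟨t, rest⟩
          · exact absurd hstack (hne rfl)
          simp [pvStepB, hstack] at hcp ⊢
          omega
        · have e1 : (c == ']') = false := by simp [hc2]
          have e2 : (c == '[') = false := by simp [hc1]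
          simp only [e1, e2] at hcp
          simp only [pvStepB, if_neg hc1, if_neg hc2]
          omega
    rw [PySem.List.enumerate_cons]
    simp only [List.foldl_cons, List.length_cons]
    have hres := ih (i + 1) (pvStepA a (i, c)) (pvStepB b (i, c)) (pvInv_step i c a b h hne) hpre'
    have hE : i + ((cs.length : Int) + 1) = i + 1 + cs.length := by ring
    push_cast
    rw [hE]
    exact hres

-- ===== VERDICT (by name: the statement is the Claim_ definition above) =====
theorem parse_spec : Claim_equal_parse := by
  intro brainFuck _ hpre
  unfold Spec_parse parse parse_alt
  have hinit : pvInv 0 ((0 : Int), (0 : Int), (PySem.Dict.empty : PySem.Dict Int Int))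
      ((0 : Int), ([] : List Int), ([] : List (Int × Int))) := by
    refine ⟨rfl, rfl, le_rfl, by simp, by simp, by simp, ?_, by simp, le_rfl, by simp⟩
    intro v
    simp only [List.map_nil, List.count_nil, pvCnt]
    rw [if_neg (by omega)]
  unfold Pre_parse at hpre
  have hfold := pvInv_fold (brainFuck.toList.filter (fun c => c ∈ pvValid)) 0 _ _ hinit
    (by simpa using hpre)
  obtain ⟨-, hitems, -⟩ := hfold
  simp only
  rw [PySem.Dict.values, PySem.Dict.values, hitems]
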